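-- pv_equiv track=rewrite | github.com/baesh3744/algorithm-solutions | coding_test/2021_카카오_채용연계형_인턴십_for_Tech_Developers/3_2_only_accuracy.py | solution
-- ===== SOURCE A (Python) =====
-- from bisect import bisect_left
-- from collections import deque
-- from typing import List
--
-- def solution(n: int, k: int, cmd: List[str]):
--     answer: str = ''
--     pointer_idx: int = k
--     table: List[int] = [num for num in range(n)]
--     deleted: deque[int] = deque()
--
--     for act in cmd:
--         if act[0] == 'U':
--             pointer_idx -= int(act.split()[1])
--         elif act[0] == 'D':
--             pointer_idx += int(act.split()[1])
--         elif act == 'C':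
--             prev_length: int = len(table)
--             deleted.append(table[pointer_idx])
--             del table[pointer_idx]
--             if pointer_idx == prev_length - 1:
--                 pointer_idx -= 1
--         elif act == 'Z':
--             row: int = deleted.pop()
--             insert_idx: int = bisect_left(table, row)
--             table.insert(insert_idx, row)
--             if insert_idx <= pointer_idx:
--                 pointer_idx += 1
--
--     for num in range(n):
--         answer += 'O' if num in table else 'X'
--
--     return answer
-- ===== SOURCE B (Python) =====
-- def solution(n, k, cmd):
--     # Zipper / two-stack cursor: up = rows above the cursor (top = nearest),
--     # down = cursor and the rows below it (top = cursor). Moves and deletes are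
--     # stack ops; the final O/X string is built by marking a preallocated array.
--     c0 = min(max(k, 0), n)                 # clamp the split point into the table
--     up = list(range(c0))                   # ascending, top at the end
--     down = list(range(n - 1, c0 - 1, -1))  # descending, cursor at the end
--     deleted = []
--     for act in cmd:
--         c = act[0]
--         if c == 'U' or c == 'D':
--             x = int(act.split()[1])
--             if c == 'U':
--                 x = -x
--             while x > 0:
--                 up.append(down.pop()); x -= 1
--             while x < 0:
--                 down.append(up.pop()); x += 1
--         elif act == 'C':
--             deleted.append(down.pop())
--             if not down:
--                 down.append(up.pop())
--         elif act == 'Z':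
--             row = deleted.pop()
--             if down and row > down[-1]:
--                 aux = []
--                 while down and down[-1] < row:
--                     aux.append(down.pop())
--                 down.append(row)
--                 while aux:
--                     down.append(aux.pop())
--             else:
--                 aux = []
--                 while up and up[-1] > row:
--                     aux.append(up.pop())
--                 up.append(row)
--                 while aux:
--                     up.append(aux.pop())
--     alive = set(up + down)
--     return ''.join('O' if i in alive else 'X' for i in range(n))
-- ===== Notes on version B (the rewrite author's own statement) =====
-- stated objective: faster
-- what changed: A keeps the surviving rows as one sorted list indexed by the pointer (O(size) delete/insert via del/bisect+insert and an O(n*size) final 'num in table' list-membership loop); B keeps a zipper of two stacks around the cursor (delete and cursor moves are stack pushes/pops, restore is a local stack reinsertion) and renders the answer with one O(n) pass over a set of the survivors.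
-- outside the precondition, e.g. on solution(2, 0, ['U 1']): A returns 'OO', B raises IndexError; on solution(2, 0, ['U 1', 'D 1', 'C']): A returns 'XO', B raises IndexError; on solution(1, 0, ['C']): A returns 'X', B raises IndexError
import Mathlib
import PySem

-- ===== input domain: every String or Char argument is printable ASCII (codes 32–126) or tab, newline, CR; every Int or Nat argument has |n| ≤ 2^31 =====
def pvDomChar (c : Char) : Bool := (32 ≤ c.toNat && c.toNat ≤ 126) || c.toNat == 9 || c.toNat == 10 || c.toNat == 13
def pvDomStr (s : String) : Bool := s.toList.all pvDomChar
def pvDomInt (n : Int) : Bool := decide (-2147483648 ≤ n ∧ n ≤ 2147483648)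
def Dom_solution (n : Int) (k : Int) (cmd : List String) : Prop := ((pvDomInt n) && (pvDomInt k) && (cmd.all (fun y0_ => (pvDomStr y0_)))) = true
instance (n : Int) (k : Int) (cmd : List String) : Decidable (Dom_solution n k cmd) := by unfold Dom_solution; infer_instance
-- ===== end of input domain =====

-- B replaces A's index-into-a-sorted-list simulation (O(n) delete/insert plus an
-- O(n·|table|) final membership loop) by a two-stack zipper over the cursor with an
-- O(n) set-membership pass for the output; equivalence of the return values is proved on Pre_.

-- ===== PORT A =====
-- step of A's command loop; state = (pointer_idx, table, deleted).
-- Where Python raises (act[0] on "", bad int(...), table[idx] out of range,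
-- pop from empty deque) the state is returned unchanged; Pre_ excludes those inputs.
def stepA (st : Int × List Int × List Int) (act : String) : Int × List Int × List Int :=
  match PySem.Str.pyGet? act 0 with
  | none => st
  | some c =>
    if c = 'U' then
      match ((PySem.Str.split₀ act)[1]?).bind PySem.Int.ofStr? with
      | none => st
      | some x => (st.1 - x, st.2.1, st.2.2)
    else if c = 'D' then
      match ((PySem.Str.split₀ act)[1]?).bind PySem.Int.ofStr? with
      | none => st
      | some x => (st.1 + x, st.2.1, st.2.2)
    else if act = "C" then
      match PySem.List.pop? st.2.1 st.1 with
      | none => st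
      | some (row, table') =>
        (if st.1 = (st.2.1.length : Int) - 1 then st.1 - 1 else st.1, table', st.2.2 ++ [row])
    else if act = "Z" then
      match PySem.List.pop? st.2.2 with
      | none => st
      | some (row, del') =>
        let i := PySem.List.bisectLeft st.2.1 row
        (if (i : Int) ≤ st.1 then st.1 + 1 else st.1, PySem.List.insert st.2.1 (i : Int) row, del')
    else st

def solution (n : Int) (k : Int) (cmd : List String) : String :=
  let st := cmd.foldl stepA (k, PySem.List.pyRange 0 n, [])
  String.ofList ((PySem.List.pyRange 0 n).foldl
    (fun acc num => acc ++ [if st.2.1.contains num then 'O' else 'X']) [])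

-- ===== PORT B =====
-- Source B uses Python lists as stacks with the top at the END; the Lean lists below
-- keep the stack top at the HEAD, so each stack appears reversed.
-- move cnt rows from `down` onto `up` (cursor moves down); Python raises on
-- pop from an empty stack, here the move stops (excluded by Pre_).
def bMoveDown : Nat → List Int → List Int → List Int × List Int
  | 0, up, down => (up, down)
  | _ + 1, up, [] => (up, [])
  | c + 1, up, r :: down => bMoveDown c (r :: up) down

def bMoveUp : Nat → List Int → List Int → List Int × List Int
  | 0, up, down => (up, down)
  | _ + 1, [], down => ([], down)
  | c + 1, r :: up, down => bMoveUp c up (r :: down)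

-- Source B's pop/push-back reinsertion loop on the `down` stack (ascending from the head)
def insDown (row : Int) : List Int → List Int
  | [] => [row]
  | d :: ds => if d < row then d :: insDown row ds else row :: d :: ds

-- the same loop on the `up` stack (descending from the head)
def insUp (row : Int) : List Int → List Int
  | [] => [row]
  | u :: us => if u > row then u :: insUp row us else row :: u :: us

def stepB (st : List Int × List Int × List Int) (act : String) : List Int × List Int × List Int :=
  match act.toList with
  | [] => st
  | c :: _ =>
    if c = 'U' ∨ c = 'D' then
      match ((PySem.Str.split₀ act)[1]?).bind PySem.Int.ofStr? with
      | none => st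
      | some x0 =>
        let x := if c = 'U' then -x0 else x0
        if 0 ≤ x then
          let p := bMoveDown x.toNat st.1 st.2.1
          (p.1, p.2, st.2.2)
        else
          let p := bMoveUp (-x).toNat st.1 st.2.1
          (p.1, p.2, st.2.2)
    else if act = "C" then
      match st.2.1 with
      | [] => st
      | row :: rest =>
        match rest with
        | [] =>
          match st.1 with
          | [] => ([], [], row :: st.2.2)
          | u :: us => (us, [u], row :: st.2.2)
        | _ => (st.1, rest, row :: st.2.2)
    else if act = "Z" then
      match st.2.2 with
      | [] => st
      | row :: dels =>
        match st.2.1 with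
        | d :: ds => if d < row then (st.1, insDown row (d :: ds), dels)
                     else (insUp row st.1, d :: ds, dels)
        | [] => (insUp row st.1, [], dels)
    else st

def solution_alt (n : Int) (k : Int) (cmd : List String) : String :=
  let c0 := min (max k 0) n
  let up0 := (PySem.List.pyRange 0 c0).reverse
  let down0 := (PySem.List.pyRange (n - 1) (c0 - 1) (-1)).reverse
  let st := cmd.foldl stepB (up0, down0, [])
  let alive := PySem.Set.ofList (st.1 ++ st.2.1)
  String.ofList ((PySem.List.pyRange 0 n).map
    (fun i => if alive.contains i then 'O' else 'X'))

-- ===== PRECONDITION & SPEC =====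
-- Pre_ admits (i) sessions of commands both programs ignore (second disjunct below), and
-- (ii) sessions whose commands are well-formed and provably keep the cursor
-- inside the table: it tracks an interval [lo, hi] enclosing every pointer position
-- the session can reach (a restore may or may not shift the pointer, so the interval
-- widens by one there), the table size and the deleted count, and demands
-- 0 ≤ pointer ≤ size after every move, pointer < size and size ≥ 2 at every delete,
-- and a nonempty deleted stack at every restore.  It thereby excludes exactly the
-- sessions on which Python A raises (empty/ill-formed command words, restore from an
-- empty stack, delete out of range) together with two defensible corners on which A
-- still returns but B's stacks naturally underflow and raise: sessions whose pointer
-- transiently leaves [0, size] (A's unused or negatively-wrapping index), sessions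
-- deleting the last remaining row (A's pointer becomes -1), and initial pointers
-- outside 0 ≤ k ≤ n.
def preStep : Option (Int × Int × Int × Int) → String → Option (Int × Int × Int × Int)
  | none, _ => none
  | some (lo, hi, size, dl), act =>
    match act.toList with
    | [] => none
    | c :: _ =>
      if c = 'U' ∨ c = 'D' then
        match ((PySem.Str.split₀ act)[1]?).bind PySem.Int.ofStr? with
        | none => none
        | some x =>
          let d := if c = 'U' then -x else x
          if 0 ≤ lo + d ∧ hi + d ≤ size then some (lo + d, hi + d, size, dl) else none
      else if act = "C" then
        if 0 ≤ lo ∧ hi ≤ size - 1 ∧ 2 ≤ size then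
          some (min lo (size - 2), min hi (size - 2), size - 1, dl + 1)
        else none
      else if act = "Z" then
        if 1 ≤ dl then some (lo, hi + 1, size + 1, dl - 1) else none
      else some (lo, hi, size, dl)

-- a command A and B both ignore: nonempty, not U/D-headed, and not exactly "C"/"Z"
def inertAct (act : String) : Bool :=
  match act.toList with
  | [] => false
  | c :: _ => !(c = 'U' || c = 'D') && !(act = "C") && !(act = "Z")

def Pre_solution (n : Int) (k : Int) (cmd : List String) : Prop :=
  (0 ≤ k ∧ k ≤ n ∧ (cmd.foldl preStep (some (k, k, n, 0))).isSome = true) ∨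
    cmd.all inertAct = true

instance (n : Int) (k : Int) (cmd : List String) : Decidable (Pre_solution n k cmd) := by
  unfold Pre_solution; infer_instance

def pvWitness_solution : Int × Int × List String := (3, 1, ["C", "Z", "U 1", "C"])

def Spec_solution (n : Int) (k : Int) (cmd : List String) (out : String) : Prop := out = solution_alt n k cmd
instance (n : Int) (k : Int) (cmd : List String) (out : String) : Decidable (Spec_solution n k cmd out) := by unfold Spec_solution; infer_instance

-- ===== CLAIM (what is proved, stated in full; the proofs are below) =====
def Claim_equal_solution : Prop := ∀ (n : Int) (k : Int) (cmd : List String), Dom_solution n k cmd → Pre_solution n k cmd → Spec_solution n k cmd (solution n k cmd)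

-- ===== LEMMAS AND PROOFS =====

-- The coupling invariant between A's state (pointer_idx, table, deleted),
-- B's state (up, down, deleted) and the Pre_ interval state (lo, hi, size, dl).
def InvSt (n : Int) (sa : Int × List Int × List Int) (sb : List Int × List Int × List Int)
    (p : Int × Int × Int × Int) : Prop :=
  sa.2.1 = sb.1.reverse ++ sb.2.1 ∧
  sa.1 = (sb.1.length : Int) ∧
  sa.2.2 = sb.2.2.reverse ∧
  List.Pairwise (· < ·) sa.2.1 ∧
  (sa.2.1 ++ sb.2.2).Perm (PySem.List.pyRange 0 n) ∧
  p.1 ≤ sa.1 ∧ sa.1 ≤ p.2.1 ∧ p.2.2.1 = (sa.2.1.length : Int) ∧ p.2.2.2 = (sb.2.2.length : Int)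

lemma foldl_preStep_none (l : List String) : l.foldl preStep none = none := by
  induction l with
  | nil => rfl
  | cons a l ih => simpa [preStep] using ih

lemma bMoveDown_eq : ∀ (c : Nat) (up down : List Int), c ≤ down.length →
    bMoveDown c up down = ((down.take c).reverse ++ up, down.drop c) := by
  intro c
  induction c with
  | zero => intro up down _; simp [bMoveDown]
  | succ c ih =>
    intro up down h
    cases down with
    | nil => simp at h
    | cons r ds =>
      rw [bMoveDown, ih (r :: up) ds (by simpa using h)]
      simp

lemma bMoveUp_eq : ∀ (c : Nat) (up down : List Int), c ≤ up.length →
    bMoveUp c up down = (up.drop c, (up.take c).reverse ++ down) := by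
  intro c
  induction c with
  | zero => intro up down _; simp [bMoveUp]
  | succ c ih =>
    intro up down h
    cases up with
    | nil => simp at h
    | cons r us =>
      rw [bMoveUp, ih us (r :: down) (by simpa using h)]
      simp

lemma eraseIdx_append_cons (l : List Int) (r : Int) (rest : List Int) :
    (l ++ r :: rest).eraseIdx l.length = l ++ rest := by
  induction l with
  | nil => simp
  | cons a l ih => simpa using ih

lemma insDown_split (row : Int) : ∀ (R : List Int), List.Pairwise (· < ·) R → row ∉ R →
    ∃ P S, R = P ++ S ∧ insDown row R = P ++ row :: S ∧
      (∀ p ∈ P, p < row) ∧ (∀ s ∈ S, row < s) := by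
  intro R
  induction R with
  | nil => intro _ _; exact ⟨[], [], by simp [insDown]⟩
  | cons d ds ih =>
    intro hpw hmem
    by_cases hd : d < row
    · obtain ⟨P, S, h1, h2, h3, h4⟩ :=
        ih (List.Pairwise.of_cons hpw) (fun h => hmem (List.mem_cons_of_mem _ h))
      refine ⟨d :: P, S, by simp [h1], ?_, ?_, h4⟩
      · simp only [insDown, if_pos hd, h2, List.cons_append]
      · intro p hp
        rcases List.mem_cons.mp hp with h | h
        · exact h ▸ hd
        · exact h3 p h
    · have hne : row ≠ d := fun h => hmem (h ▸ List.mem_cons_self)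
      have hrd : row < d := lt_of_le_of_ne (not_lt.mp hd) hne
      refine ⟨[], d :: ds, rfl, by simp [insDown, hd], by simp, ?_⟩
      intro s hs
      rcases List.mem_cons.mp hs with h | h
      · exact h ▸ hrd
      · exact lt_trans hrd ((List.pairwise_cons.mp hpw).1 s h)

lemma insUp_split (row : Int) : ∀ (U : List Int), List.Pairwise (· > ·) U → row ∉ U →
    ∃ P S, U = P ++ S ∧ insUp row U = P ++ row :: S ∧
      (∀ p ∈ P, row < p) ∧ (∀ s ∈ S, s < row) := by
  intro U
  induction U with
  | nil => intro _ _; exact ⟨[], [], by simp [insUp]⟩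
  | cons u us ih =>
    intro hpw hmem
    by_cases hu : u > row
    · obtain ⟨P, S, h1, h2, h3, h4⟩ :=
        ih (List.Pairwise.of_cons hpw) (fun h => hmem (List.mem_cons_of_mem _ h))
      refine ⟨u :: P, S, by simp [h1], ?_, ?_, h4⟩
      · simp only [insUp, if_pos hu, h2, List.cons_append]
      · intro p hp
        rcases List.mem_cons.mp hp with h | h
        · exact h ▸ hu
        · exact h3 p h
    · have hne : u ≠ row := fun h => hmem (h ▸ List.mem_cons_self)
      have hur : u < row := lt_of_le_of_ne (not_lt.mp hu) hne
      refine ⟨[], u :: us, rfl, by simp [insUp, hu], by simp, ?_⟩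
      intro s hs
      rcases List.mem_cons.mp hs with h | h
      · exact h ▸ hur
      · exact lt_trans ((List.pairwise_cons.mp hpw).1 s h) hur

lemma bisect_eq_of_split (P S : List Int) (row : Int)
    (hpw : List.Pairwise (· < ·) (P ++ S))
    (hP : ∀ p ∈ P, p < row) (hS : ∀ s ∈ S, row < s) :
    PySem.List.bisectLeft (P ++ S) row = P.length := by
  obtain ⟨hle, hlt, hge⟩ :=
    PySem.List.bisectLeft_spec (P ++ S) row (hpw.imp le_of_lt)
  set i := PySem.List.bisectLeft (P ++ S) row with hi
  rcases Nat.lt_trichotomy i P.length with h | h | h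
  · exfalso
    have hjlen : i < (P ++ S).length := by simp; omega
    have h1 := hge i hjlen (le_refl i)
    have h2 : (P ++ S)[i] ∈ P := by
      rw [List.getElem_append_left h]
      exact List.getElem_mem _
    exact absurd (hP _ h2) (not_lt.mpr h1)
  · exact h
  · exfalso
    have hjlen : P.length < (P ++ S).length := by omega
    have h1 := hlt P.length hjlen h
    have h2 : (P ++ S)[P.length] ∈ S := by
      rw [List.getElem_append_right (le_refl P.length)]
      exact List.getElem_mem _
    exact absurd (hS _ h2) (not_lt.mpr (le_of_lt h1))

-- A's sorted reinsertion 'table.insert(bisect_left(table, row), row)' lands exactly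
-- between the elements below and above row.
lemma insert_bisect_eq (P S : List Int) (row : Int)
    (hpw : List.Pairwise (· < ·) (P ++ S))
    (hP : ∀ p ∈ P, p < row) (hS : ∀ s ∈ S, row < s) :
    PySem.List.insert (P ++ S) ((PySem.List.bisectLeft (P ++ S) row : Nat) : Int) row
      = P ++ row :: S := by
  rw [bisect_eq_of_split P S row hpw hP hS,
    PySem.List.insert_natCast _ _ _ (by simp)]
  rw [List.take_left' rfl, List.drop_left]

lemma inv_step (n : Int) (idx : Int) (table delA up down delB : List Int)
    (p p' : Int × Int × Int × Int) (act : String)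
    (h : InvSt n (idx, table, delA) (up, down, delB) p)
    (hs : preStep (some p) act = some p') :
    InvSt n (stepA (idx, table, delA) act) (stepB (up, down, delB) act) p' := by
  obtain ⟨lo, hi, size, dl⟩ := p
  obtain ⟨htab, hidx, hdel, hpw, hperm, hlo, hhi, hsize, hdl⟩ := h
  simp only at htab hidx hdel hpw hperm hlo hhi hsize hdl
  have hlen : table.length = up.length + down.length := by simp [htab]
  cases hact : act.toList with
  | nil => simp [preStep, hact] at hs
  | cons c cs =>
    have hget : PySem.List.pyGet? act.toList 0 = some c := by
      simpa [hact] using PySem.List.pyGet?_natCast act.toList 0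
    by_cases hUD : c = 'U' ∨ c = 'D'
    · -- move commands
      cases hparse : ((PySem.Str.split₀ act)[1]?).bind PySem.Int.ofStr? with
      | none => simp [preStep, hact, hUD, hparse] at hs
      | some x =>
        have hss := hs
        simp only [preStep, hact, hUD, if_true, hparse] at hss
        set δ : Int := if c = 'U' then -x else x with hδ
        by_cases hcond : 0 ≤ lo + δ ∧ hi + δ ≤ size
        swap
        · simp [hcond] at hss
        obtain ⟨hc1, hc2⟩ := hcond
        have hp' : p' = (lo + δ, hi + δ, size, dl) := by
          simp [hc1, hc2] at hss; exact hss.symm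
        have hstepA : stepA (idx, table, delA) act = (idx + δ, table, delA) := by
          rcases hUD with hU | hU <;> subst hU <;>
            simp [stepA, hget, hparse, hδ, sub_eq_add_neg]
        rcases le_or_gt 0 δ with hd0 | hd0
        · have hm : δ.toNat ≤ down.length := by omega
          have hstepB : stepB (up, down, delB) act =
              ((down.take δ.toNat).reverse ++ up, down.drop δ.toNat, delB) := by
            simp only [stepB, hact, hUD, if_true, hparse, ← hδ, if_pos hd0]
            rw [bMoveDown_eq _ _ _ hm]
          rw [hstepA, hstepB, hp']
          refine ⟨?_, ?_, hdel, hpw, hperm, by simp only; omega, by simp only; omega,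
            hsize, hdl⟩
          · simp only [htab, List.reverse_append, List.reverse_reverse, List.append_assoc,
              List.take_append_drop]
          · simp only [List.length_append, List.length_reverse, List.length_take]
            omega
        · have hm : (-δ).toNat ≤ up.length := by omega
          have hstepB : stepB (up, down, delB) act =
              (up.drop (-δ).toNat, (up.take (-δ).toNat).reverse ++ down, delB) := by
            simp only [stepB, hact, hUD, if_true, hparse, ← hδ, if_neg (by omega : ¬ (0:Int) ≤ δ)]
            rw [bMoveUp_eq _ _ _ hm]
          rw [hstepA, hstepB, hp']
          refine ⟨?_, ?_, hdel, hpw, hperm, by simp only; omega, by simp only; omega,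
            hsize, hdl⟩
          · rw [htab]
            rw [← List.append_assoc, ← List.reverse_append, List.take_append_drop]
          · simp only [List.length_drop]
            omega
    · have hcU : ¬ (c = 'U') := fun hh => hUD (Or.inl hh)
      have hcD : ¬ (c = 'D') := fun hh => hUD (Or.inr hh)
      by_cases hC : act = "C"
      · -- delete the pointed row
        have hss := hs
        simp [preStep, hact, hUD, hC] at hss
        obtain ⟨⟨hc0, hc1, hc2⟩, hp'⟩ := hss
        cases down with
        | nil => exfalso; simp at hlen; omega
        | cons row rest =>
          have hpop : PySem.List.pop? table idx = some (row, up.reverse ++ rest) := by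
            rw [htab, hidx]
            rw [show ((up.length : Nat) : Int) = ((up.reverse.length : Nat) : Int) by simp]
            rw [PySem.List.pop?_natCast _ _ (by simp)]
            have e1 : (up.reverse ++ row :: rest)[up.reverse.length]'(by simp) = row := by
              rw [List.getElem_append_right (le_refl _)]
              simp
            rw [e1, eraseIdx_append_cons]
          have hcnd : (idx = (table.length : Int) - 1) ↔ rest = [] := by
            rw [hidx, htab]
            simp only [List.length_append, List.length_reverse, List.length_cons]
            rw [← List.length_eq_zero_iff]
            omega
          cases hrest : rest with
          | nil =>
            subst hrest
            cases up with
            | nil =>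
              exfalso; rw [htab] at hsize; simp at hsize; omega
            | cons u us =>
              have hstepA : stepA (idx, table, delA) act =
                  (idx - 1, (u :: us).reverse ++ [], delA ++ [row]) := by
                simp only [stepA, PySem.Str.pyGet?_eq, PySem.Chars.pyGet?_eq_listPyGet?, hget,
                  if_neg hcU, if_neg hcD, if_pos hC, hpop, if_pos (hcnd.mpr rfl)]
              have hstepB : stepB (u :: us, [row], delB) act =
                  (us, [u], row :: delB) := by
                simp [stepB, hact, hUD, hC]
              rw [hstepA, hstepB, ← hp']
              have hlen2 : table.length = us.length + 2 := by
                rw [htab]; simp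
              simp only [List.length_cons] at hidx
              refine ⟨by simp, ?_, by simp [hdel], ?_, ?_, ?_, ?_, ?_, ?_⟩
              · simp only [List.append_nil, List.length_reverse, List.length_cons]
                omega
              · have h2 := htab ▸ hpw
                simpa using (List.pairwise_append.mp h2).1
              · have hre : ((u :: us).reverse ++ []) ++ row :: delB = table ++ delB := by
                  rw [htab]; simp
                rw [hre]; exact hperm
              · simp only; omega
              · simp only; omega
              · simp only [List.append_nil, List.length_reverse, List.length_cons]; omega
              · simp only [List.length_cons]; omega
          | cons r2 rest' =>
            subst hrest
            have hstepA : stepA (idx, table, delA) act =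
                (idx, up.reverse ++ r2 :: rest', delA ++ [row]) := by
              simp only [stepA, PySem.Str.pyGet?_eq, PySem.Chars.pyGet?_eq_listPyGet?, hget,
                if_neg hcU, if_neg hcD, if_pos hC, hpop,
                if_neg (fun hh => by exact absurd (hcnd.mp hh) (by simp))]
            have hstepB : stepB (up, row :: r2 :: rest', delB) act =
                (up, r2 :: rest', row :: delB) := by
              simp [stepB, hact, hUD, hC]
            rw [hstepA, hstepB, ← hp']
            have hlen2 : table.length = up.length + rest'.length + 2 := by
              rw [htab]; simp; omega
            refine ⟨by simp, by simpa using hidx, by simp [hdel], ?_, ?_, ?_, ?_, ?_, ?_⟩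
            · exact (htab ▸ hpw).sublist
                ((List.sublist_cons_self row (r2 :: rest')).append_left up.reverse)
            · have hmid : ((up.reverse ++ r2 :: rest') ++ row :: delB).Perm
                  ((up.reverse ++ row :: r2 :: rest') ++ delB) := by
                simp only [List.append_assoc]
                exact List.Perm.append_left up.reverse
                  (by simpa using (List.perm_middle (a := row) (l₁ := r2 :: rest') (l₂ := delB)))
              exact hmid.trans (htab ▸ hperm)
            · simp only; omega
            · simp only; omega
            · simp only [List.length_append, List.length_reverse, List.length_cons]; omega
            · simp only [List.length_cons]; omega
      · by_cases hZ : act = "Z"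
        · -- restore the most recently deleted row
          have hss := hs
          simp [preStep, hact, hUD, hC, hZ] at hss
          obtain ⟨hdl1, hp'⟩ := hss
          cases delB with
          | nil => exfalso; simp at hdl; omega
          | cons row dels =>
            simp only [List.length_cons] at hdl
            have hpopZ : PySem.List.pop? delA = some (row, dels.reverse) := by
              rw [hdel, List.reverse_cons]
              exact PySem.List.pop?_last _ _
            have hnodup : (table ++ (row :: dels)).Nodup :=
              (hperm.nodup_iff).mpr (PySem.List.nodup_pyRange_one 0 n)
            have hrowtab : row ∉ table := by
              intro hmem
              exact (List.disjoint_of_nodup_append hnodup) hmem List.mem_cons_self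
            have hstepBpre : ∀ st, stepB st act =
                (match st.2.2 with
                 | [] => st
                 | row :: dels =>
                   match st.2.1 with
                   | d :: ds => if d < row then (st.1, insDown row (d :: ds), dels)
                                else (insUp row st.1, d :: ds, dels)
                   | [] => (insUp row st.1, [], dels)) := by
              intro st; simp [stepB, hact, hUD, hC, hZ]
            cases down with
            | nil =>
              have htab' : table = up.reverse := by simpa using htab
              have hupw : List.Pairwise (· > ·) up := by
                rw [htab'] at hpw; exact List.pairwise_reverse.mp hpw
              have hrowup : row ∉ up := fun h => hrowtab (htab' ▸ List.mem_reverse.mpr h)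
              obtain ⟨P, S, hPS, hins, hP, hS⟩ := insUp_split row up hupw hrowup
              have htabPS : table = S.reverse ++ P.reverse := by
                rw [htab', hPS, List.reverse_append]
              have hpwPS : List.Pairwise (· < ·) (S.reverse ++ P.reverse) := htabPS ▸ hpw
              have hPrev : ∀ x ∈ S.reverse, x < row := fun x hx => hS x (List.mem_reverse.mp hx)
              have hSrev : ∀ x ∈ P.reverse, row < x := fun x hx => hP x (List.mem_reverse.mp hx)
              have hbis : PySem.List.bisectLeft table row = S.reverse.length := by
                rw [htabPS]
                exact bisect_eq_of_split _ _ _ hpwPS hPrev hSrev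
              have hinsT : PySem.List.insert table
                  ((PySem.List.bisectLeft table row : Nat) : Int) row
                  = S.reverse ++ row :: P.reverse := by
                rw [htabPS]
                exact insert_bisect_eq _ _ _ hpwPS hPrev hSrev
              have hulen : up.length = P.length + S.length := by rw [hPS]; simp
              have hle : ((PySem.List.bisectLeft table row : Nat) : Int) ≤ idx := by
                rw [hbis, hidx]
                simp only [List.length_reverse]
                omega
              have hstepA : stepA (idx, table, delA) act =
                  (idx + 1, S.reverse ++ row :: P.reverse, dels.reverse) := by
                simp only [stepA, PySem.Str.pyGet?_eq, PySem.Chars.pyGet?_eq_listPyGet?, hget,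
                  if_neg hcU, if_neg hcD, if_neg hC, if_pos hZ, hpopZ, hinsT, if_pos hle]
              have hstepB : stepB (up, [], row :: dels) act = (insUp row up, [], dels) :=
                hstepBpre _
              rw [hstepA, hstepB, ← hp']
              have hlenPS : table.length = S.length + P.length := by rw [htabPS]; simp
              refine ⟨?_, ?_, rfl, ?_, ?_, ?_, ?_, ?_, ?_⟩
              · rw [hins]
                simp [List.reverse_append]
              · rw [hins]
                simp only [List.length_append, List.length_cons]
                omega
              · rcases List.pairwise_append.mp hpwPS with ⟨pw1, pw2, cross⟩
                refine List.pairwise_append.mpr ⟨pw1, ?_, ?_⟩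
                · exact List.pairwise_cons.mpr ⟨fun y hy => hSrev y hy, pw2⟩
                · intro a ha b hb
                  rcases List.mem_cons.mp hb with hb | hb
                  · exact hb ▸ hPrev a ha
                  · exact cross a ha b hb
              · have h1 : (S.reverse ++ row :: P.reverse).Perm (row :: table) := by
                  rw [htabPS]; exact List.perm_middle
                have h2 := h1.append_right dels
                have h3 : ((row :: table) ++ dels).Perm (table ++ row :: dels) := by
                  simp only [List.cons_append]
                  exact (List.perm_middle (a := row) (l₁ := table) (l₂ := dels)).symm
                exact (h2.trans h3).trans hperm
              · simp only; omega
              · simp only; omega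
              · simp only [List.length_append, List.length_reverse, List.length_cons]; omega
              · simp only; omega
            | cons d ds =>
              rcases List.pairwise_append.mp (htab ▸ hpw) with ⟨pwUp, pwDown, crossUD⟩
              have hrowdown : row ∉ (d :: ds) := fun h =>
                hrowtab (htab ▸ List.mem_append_right _ h)
              have hrowup : row ∉ up := fun h =>
                hrowtab (htab ▸ List.mem_append_left _ (List.mem_reverse.mpr h))
              by_cases hdr : d < row
              · -- row goes back below the cursor
                obtain ⟨P, S, hPS, hins, hP, hS⟩ := insDown_split row (d :: ds) pwDown hrowdown
                have hPne : P ≠ [] := by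
                  intro hPnil
                  rw [hPnil, List.nil_append] at hPS
                  exact absurd (hS d (hPS ▸ List.mem_cons_self)) (not_lt.mpr (le_of_lt hdr))
                have htab2 : table = (up.reverse ++ P) ++ S := by
                  rw [htab, hPS, List.append_assoc]
                have hpw2 : List.Pairwise (· < ·) ((up.reverse ++ P) ++ S) := htab2 ▸ hpw
                have hLlt : ∀ x ∈ up.reverse ++ P, x < row := by
                  intro x hx
                  rcases List.mem_append.mp hx with hx | hx
                  · exact lt_trans (crossUD x hx d List.mem_cons_self) hdr
                  · exact hP x hx
                have hbis : PySem.List.bisectLeft table row = (up.reverse ++ P).length := by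
                  rw [htab2]
                  exact bisect_eq_of_split _ _ _ hpw2 hLlt hS
                have hinsT : PySem.List.insert table
                    ((PySem.List.bisectLeft table row : Nat) : Int) row
                    = (up.reverse ++ P) ++ row :: S := by
                  rw [htab2]
                  exact insert_bisect_eq _ _ _ hpw2 hLlt hS
                have hPpos : 0 < P.length := List.length_pos_iff.mpr hPne
                have hgt : ¬ ((PySem.List.bisectLeft table row : Nat) : Int) ≤ idx := by
                  rw [hbis, hidx]
                  simp only [List.length_append, List.length_reverse]
                  omega
                have hstepA : stepA (idx, table, delA) act =
                    (idx, (up.reverse ++ P) ++ row :: S, dels.reverse) := by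
                  simp only [stepA, PySem.Str.pyGet?_eq, PySem.Chars.pyGet?_eq_listPyGet?, hget,
                    if_neg hcU, if_neg hcD, if_neg hC, if_pos hZ, hpopZ, hinsT, if_neg hgt]
                have hstepB : stepB (up, d :: ds, row :: dels) act =
                    (up, insDown row (d :: ds), dels) := by
                  rw [hstepBpre]
                  simp [hdr]
                rw [hstepA, hstepB, ← hp']
                have hlen2 : table.length = up.length + P.length + S.length := by
                  rw [htab2]; simp; omega
                refine ⟨?_, by simpa using hidx, rfl, ?_, ?_, ?_, ?_, ?_, ?_⟩
                · rw [hins]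
                  simp [List.append_assoc]
                · rcases List.pairwise_append.mp hpw2 with ⟨pwL, pwS, crossLS⟩
                  refine List.pairwise_append.mpr
                    ⟨pwL, List.pairwise_cons.mpr ⟨hS, pwS⟩, ?_⟩
                  intro a ha b hb
                  rcases List.mem_cons.mp hb with hb | hb
                  · exact hb ▸ hLlt a ha
                  · exact crossLS a ha b hb
                · have h1 : ((up.reverse ++ P) ++ row :: S).Perm (row :: table) := by
                    rw [htab2]; exact List.perm_middle
                  have h2 := h1.append_right dels
                  have h3 : ((row :: table) ++ dels).Perm (table ++ row :: dels) := by
                    simp only [List.cons_append]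
                    exact (List.perm_middle (a := row) (l₁ := table) (l₂ := dels)).symm
                  exact (h2.trans h3).trans hperm
                · simp only; omega
                · simp only; omega
                · simp only [List.length_append, List.length_reverse, List.length_cons]; omega
                · simp only; omega
              · -- row goes back above the cursor
                have hrd : row < d := by
                  have hne : row ≠ d := fun h => hrowdown (h ▸ List.mem_cons_self)
                  exact lt_of_le_of_ne (not_lt.mp hdr) hne
                have hupw : List.Pairwise (· > ·) up := List.pairwise_reverse.mp pwUp
                obtain ⟨P, S, hPS, hins, hP, hS⟩ := insUp_split row up hupw hrowup
                have htab2 : table = S.reverse ++ (P.reverse ++ d :: ds) := by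
                  rw [htab, hPS, List.reverse_append, List.append_assoc]
                have hpw2 : List.Pairwise (· < ·) (S.reverse ++ (P.reverse ++ d :: ds)) :=
                  htab2 ▸ hpw
                have hLlt : ∀ x ∈ S.reverse, x < row := fun x hx => hS x (List.mem_reverse.mp hx)
                have hRgt : ∀ x ∈ P.reverse ++ d :: ds, row < x := by
                  intro x hx
                  rcases List.mem_append.mp hx with hx | hx
                  · exact hP x (List.mem_reverse.mp hx)
                  · rcases List.mem_cons.mp hx with hx | hx
                    · exact hx ▸ hrd
                    · exact lt_trans hrd ((List.pairwise_cons.mp pwDown).1 x hx)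
                have hbis : PySem.List.bisectLeft table row = S.reverse.length := by
                  rw [htab2]
                  exact bisect_eq_of_split _ _ _ hpw2 hLlt hRgt
                have hinsT : PySem.List.insert table
                    ((PySem.List.bisectLeft table row : Nat) : Int) row
                    = S.reverse ++ row :: (P.reverse ++ d :: ds) := by
                  rw [htab2]
                  exact insert_bisect_eq _ _ _ hpw2 hLlt hRgt
                have hulen : up.length = P.length + S.length := by rw [hPS]; simp
                have hle : ((PySem.List.bisectLeft table row : Nat) : Int) ≤ idx := by
                  rw [hbis, hidx]
                  simp only [List.length_reverse]
                  omega
                have hstepA : stepA (idx, table, delA) act =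
                    (idx + 1, S.reverse ++ row :: (P.reverse ++ d :: ds), dels.reverse) := by
                  simp only [stepA, PySem.Str.pyGet?_eq, PySem.Chars.pyGet?_eq_listPyGet?, hget,
                    if_neg hcU, if_neg hcD, if_neg hC, if_pos hZ, hpopZ, hinsT, if_pos hle]
                have hstepB : stepB (up, d :: ds, row :: dels) act =
                    (insUp row up, d :: ds, dels) := by
                  rw [hstepBpre]
                  simp [hdr]
                rw [hstepA, hstepB, ← hp']
                have hlen2 : table.length = S.length + P.length + ds.length + 1 := by
                  rw [htab2]; simp; omega
                refine ⟨?_, ?_, rfl, ?_, ?_, ?_, ?_, ?_, ?_⟩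
                · rw [hins]
                  simp [List.reverse_append, List.append_assoc]
                · rw [hins]
                  simp only [List.length_append, List.length_cons]
                  omega
                · rcases List.pairwise_append.mp hpw2 with ⟨pwL, pwR, crossLR⟩
                  refine List.pairwise_append.mpr
                    ⟨pwL, List.pairwise_cons.mpr ⟨hRgt, pwR⟩, ?_⟩
                  intro a ha b hb
                  rcases List.mem_cons.mp hb with hb | hb
                  · exact hb ▸ hLlt a ha
                  · exact crossLR a ha b hb
                · have h1 : (S.reverse ++ row :: (P.reverse ++ d :: ds)).Perm (row :: table) := by
                    rw [htab2]; exact List.perm_middle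
                  have h2 := h1.append_right dels
                  have h3 : ((row :: table) ++ dels).Perm (table ++ row :: dels) := by
                    simp only [List.cons_append]
                    exact (List.perm_middle (a := row) (l₁ := table) (l₂ := dels)).symm
                  exact (h2.trans h3).trans hperm
                · simp only; omega
                · simp only; omega
                · simp only [List.length_append, List.length_reverse, List.length_cons]; omega
                · simp only; omega
        · -- any other string is ignored by both programs
          have hp' : p' = (lo, hi, size, dl) := by
            have hss := hs
            simp [preStep, hact, hUD, hC, hZ] at hss
            exact hss.symm
          have hstepA : stepA (idx, table, delA) act = (idx, table, delA) := by
            simp [stepA, hget, hcU, hcD, hC, hZ]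
          have hstepB : stepB (up, down, delB) act = (up, down, delB) := by
            simp [stepB, hact, hUD, hC, hZ]
          rw [hstepA, hstepB, hp']
          exact ⟨htab, hidx, hdel, hpw, hperm, hlo, hhi, hsize, hdl⟩


lemma fold_inv (n : Int) : ∀ (cmd : List String) (p p' : Int × Int × Int × Int)
    (sa : Int × List Int × List Int) (sb : List Int × List Int × List Int),
    InvSt n sa sb p → cmd.foldl preStep (some p) = some p' →
    InvSt n (cmd.foldl stepA sa) (cmd.foldl stepB sb) p' := by
  intro cmd
  induction cmd with
  | nil =>
    intro p p' sa sb h hfold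
    simp only [List.foldl_nil] at hfold ⊢
    cases hfold
    exact h
  | cons act rest ih =>
    intro p p' sa sb h hfold
    simp only [List.foldl_cons] at hfold ⊢
    cases hq : preStep (some p) act with
    | none => rw [hq, foldl_preStep_none] at hfold; exact absurd hfold (by simp)
    | some q =>
      rw [hq] at hfold
      obtain ⟨idx, table, delA⟩ := sa
      obtain ⟨up, down, delB⟩ := sb
      exact ih q p' _ _ (inv_step n idx table delA up down delB p q act h hq) hfold

lemma inv_init (n k : Int) (h0 : 0 ≤ k) (h1 : k ≤ n) :
    InvSt n (k, PySem.List.pyRange 0 n, [])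
      ((PySem.List.pyRange 0 k).reverse, (PySem.List.pyRange (n-1) (k-1) (-1)).reverse, [])
      (k, k, n, 0) := by
  have hdown : (PySem.List.pyRange (n-1) (k-1) (-1)).reverse = PySem.List.pyRange k n := by
    rw [PySem.List.pyRange_neg_one_eq_reverse]
    rw [List.reverse_reverse]
    congr 1 <;> ring
  have hsplit : PySem.List.pyRange 0 n = PySem.List.pyRange 0 k ++ PySem.List.pyRange k n :=
    PySem.List.pyRange_one_append 0 k n h0 h1
  refine ⟨?_, ?_, rfl, ?_, ?_, le_refl _, le_refl _, ?_, ?_⟩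
  · simp only [List.reverse_reverse, hdown]
    exact hsplit
  · simp only [List.length_reverse, PySem.List.length_pyRange_one]
    omega
  · exact PySem.List.pairwise_lt_pyRange_one 0 n
  · simp
  · simp only [PySem.List.length_pyRange_one]
    omega
  · simp

lemma render_eq (n : Int) (sa : Int × List Int × List Int)
    (sb : List Int × List Int × List Int) (p : Int × Int × Int × Int)
    (h : InvSt n sa sb p) :
    String.ofList ((PySem.List.pyRange 0 n).foldl
      (fun acc num => acc ++ [if sa.2.1.contains num then 'O' else 'X']) []) =
    String.ofList ((PySem.List.pyRange 0 n).map
      (fun i => if (PySem.Set.ofList (sb.1 ++ sb.2.1)).contains i then 'O' else 'X')) := by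
  obtain ⟨htab, -, -, -, -, -, -, -, -⟩ := h
  congr 1
  rw [PySem.List.foldl_append_singleton_eq_map, List.nil_append]
  apply List.map_congr_left
  intro num _
  have hmem : num ∈ sa.2.1 ↔ num ∈ sb.1 ++ sb.2.1 := by
    rw [htab]
    simp [List.mem_append]
  have : sa.2.1.contains num = (PySem.Set.ofList (sb.1 ++ sb.2.1)).contains num := by
    by_cases hm : num ∈ sa.2.1
    · rw [List.contains_iff_mem.mpr hm,
        (PySem.Set.contains_iff _ _).mpr ((PySem.Set.mem_ofList _ _).mpr (hmem.mp hm))]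
    · have hb : ¬ num ∈ PySem.Set.ofList (sb.1 ++ sb.2.1) :=
        fun hh => hm (hmem.mpr ((PySem.Set.mem_ofList _ _).mp hh))
      simp [List.contains_iff_mem, hm, PySem.Set.contains_iff, hb]
  rw [this]

lemma stepA_inert (st : Int × List Int × List Int) (act : String)
    (h : inertAct act = true) : stepA st act = st := by
  unfold inertAct at h
  cases hact : act.toList with
  | nil => rw [hact] at h; simp at h
  | cons c cs =>
    rw [hact] at h
    have hcU : ¬ c = 'U' := fun hh => by simp [hh] at h
    have hcD : ¬ c = 'D' := fun hh => by simp [hh] at h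
    have hC : ¬ act = "C" := fun hh => by simp [hh] at h
    have hZ : ¬ act = "Z" := fun hh => by simp [hh] at h
    have hget : PySem.List.pyGet? act.toList 0 = some c := by
      simpa [hact] using PySem.List.pyGet?_natCast act.toList 0
    obtain ⟨idx, table, delA⟩ := st
    simp [stepA, hget, hcU, hcD, hC, hZ]

lemma stepB_inert (st : List Int × List Int × List Int) (act : String)
    (h : inertAct act = true) : stepB st act = st := by
  unfold inertAct at h
  cases hact : act.toList with
  | nil => rw [hact] at h; simp at h
  | cons c cs =>
    rw [hact] at h
    have hcU : ¬ c = 'U' := fun hh => by simp [hh] at h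
    have hcD : ¬ c = 'D' := fun hh => by simp [hh] at h
    have hC : ¬ act = "C" := fun hh => by simp [hh] at h
    have hZ : ¬ act = "Z" := fun hh => by simp [hh] at h
    have hUD : ¬ (c = 'U' ∨ c = 'D') := by tauto
    simp [stepB, hact, hUD, hC, hZ]

lemma foldl_inert {σ : Type} (step : σ → String → σ)
    (hstep : ∀ st act, inertAct act = true → step st act = st) :
    ∀ (cmd : List String) (st : σ), cmd.all inertAct = true → cmd.foldl step st = st := by
  intro cmd
  induction cmd with
  | nil => intro st _; rfl
  | cons act rest ih =>
    intro st h
    rw [List.all_cons, Bool.and_eq_true] at h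
    rw [List.foldl_cons, hstep st act h.1, ih st h.2]

-- ===== VERDICT (by name: the statement is the Claim_ definition above) =====
theorem solution_spec : Claim_equal_solution := by
  intro n k cmd _ hpre
  unfold Spec_solution solution solution_alt
  rcases hpre with ⟨h0, h1, h2⟩ | hinert
  · have hc0 : min (max k 0) n = k := by omega
    simp only [hc0]
    obtain ⟨p', hp'⟩ := Option.isSome_iff_exists.mp h2
    have hinv := fold_inv n cmd (k, k, n, 0) p' _ _ (inv_init n k h0 h1) hp'
    exact render_eq n _ _ p' hinv
  · simp only [foldl_inert stepA stepA_inert cmd _ hinert,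
      foldl_inert stepB stepB_inert cmd _ hinert]
    congr 1
    rw [PySem.List.foldl_append_singleton_eq_map, List.nil_append]
    apply List.map_congr_left
    intro num hnum
    obtain ⟨ha, hb⟩ := PySem.List.mem_pyRange_one.mp hnum
    have h1 : (PySem.List.pyRange 0 n).contains num = true := List.contains_iff_mem.mpr hnum
    have hdown : (PySem.List.pyRange (n - 1) (min (max k 0) n - 1) (-1)).reverse
        = PySem.List.pyRange (min (max k 0) n) n := by
      rw [PySem.List.pyRange_neg_one_eq_reverse, List.reverse_reverse]
      congr 1 <;> ring
    have hmem : num ∈ (PySem.List.pyRange 0 (min (max k 0) n)).reverse ++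
        (PySem.List.pyRange (n - 1) (min (max k 0) n - 1) (-1)).reverse := by
      rw [hdown, List.mem_append, List.mem_reverse]
      by_cases hcm : num < min (max k 0) n
      · exact Or.inl (PySem.List.mem_pyRange_one.mpr ⟨ha, hcm⟩)
      · exact Or.inr (PySem.List.mem_pyRange_one.mpr ⟨by omega, hb⟩)
    have h2 : (PySem.Set.ofList ((PySem.List.pyRange 0 (min (max k 0) n)).reverse ++
        (PySem.List.pyRange (n - 1) (min (max k 0) n - 1) (-1)).reverse)).contains num = true :=
      (PySem.Set.contains_iff _ _).mpr ((PySem.Set.mem_ofList _ _).mpr hmem)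
    rw [h1, h2]
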